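-- pv_equiv track=rewrite | github.com/wudaoyou/CCC_Solutions | CCC/foo/ccc2013/J3_2013.py | max_chore
-- ===== SOURCE A (Python) =====
-- def max_chore(target, data, i):
--     if target == 0:
--         result = 0
--     elif target < 0:
--         result = 0
--     elif i < 0:
--         result = 0
--     elif data[i] > target:
--         result = max_chore(target, data, i - 1)
--     else:
--         num1 = 1+max_chore(target - data[i], data, i - 1)
--         num2 = max_chore(target, data, i - 1)
--         result = max(num1, num2)
--     return result
-- ===== SOURCE B (Python) =====
-- def max_chore(target, data, i):
--     memo = {}
--
--     def go(t, j):
--         if t <= 0 or j < 0: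
--             return 0
--         key = (t, j)
--         if key in memo:
--             return memo[key]
--         x = data[j]
--         if x > t:
--             r = go(t, j - 1)
--         else:
--             r = max(1 + go(t - x, j - 1), go(t, j - 1))
--         memo[key] = r
--         return r
--
--     return go(target, i)
-- ===== Notes on version B (the rewrite author's own statement) =====
-- stated objective: alternative
-- what changed: B replaces A's naive exponential recursion with top-down dynamic programming: a memo dictionary keyed by (remaining target, index) so each distinct subproblem is solved once.
import Mathlib
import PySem

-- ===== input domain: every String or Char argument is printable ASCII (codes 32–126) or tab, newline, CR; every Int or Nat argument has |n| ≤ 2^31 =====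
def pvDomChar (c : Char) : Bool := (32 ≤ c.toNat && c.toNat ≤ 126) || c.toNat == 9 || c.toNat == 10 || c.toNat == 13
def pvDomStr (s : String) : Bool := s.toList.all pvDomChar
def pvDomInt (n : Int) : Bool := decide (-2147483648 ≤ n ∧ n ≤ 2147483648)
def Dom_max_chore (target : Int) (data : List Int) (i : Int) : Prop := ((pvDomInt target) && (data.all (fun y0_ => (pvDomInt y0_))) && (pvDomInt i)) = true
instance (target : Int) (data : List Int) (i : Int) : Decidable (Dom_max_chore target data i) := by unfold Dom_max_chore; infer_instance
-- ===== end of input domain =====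

-- B memoizes A's recursion in a dictionary keyed by (target, index); return values agree on all inputs where A returns.

-- ===== PORT A =====
def max_chore (target : Int) (data : List Int) (i : Int) : Int :=
  if target = 0 then 0
  else if target < 0 then 0
  else if i < 0 then 0
  else
    -- data[i]: in-range under Pre_ (IndexError excluded by Pre_max_chore)
    let x := (PySem.List.pyGet? data i).getD 0
    if x > target then max_chore target data (i - 1)
    else max (1 + max_chore (target - x) data (i - 1)) (max_chore target data (i - 1))
termination_by (i + 1).toNat
decreasing_by all_goals omega

-- ===== PORT B =====
def goAlt (data : List Int) (memo : PySem.Dict (Int × Int) Int) (t j : Int) :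
    Int × PySem.Dict (Int × Int) Int :=
  if t ≤ 0 ∨ j < 0 then (0, memo)
  else
    match memo.get? (t, j) with
    | some v => (v, memo)
    | none =>
      -- data[j]: in-range under Pre_ (IndexError excluded by Pre_max_chore)
      let x := (PySem.List.pyGet? data j).getD 0
      let (r, memo') :=
        if x > t then goAlt data memo t (j - 1)
        else
          let (a, m1) := goAlt data memo (t - x) (j - 1)
          let (b, m2) := goAlt data m1 t (j - 1)
          (max (1 + a) b, m2)
      (r, memo'.insert (t, j) r)
termination_by (j + 1).toNat
decreasing_by all_goals omega

def max_chore_alt (target : Int) (data : List Int) (i : Int) : Int :=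
  (goAlt data PySem.Dict.empty target i).1

-- ===== PRECONDITION & SPEC =====
-- Pre_ excludes exactly the inputs where Python A raises IndexError: target > 0 and 0 ≤ i but i ≥ len(data).
def Pre_max_chore (target : Int) (data : List Int) (i : Int) : Prop :=
  target ≤ 0 ∨ i < 0 ∨ i < (data.length : Int)
instance (target : Int) (data : List Int) (i : Int) : Decidable (Pre_max_chore target data i) := by unfold Pre_max_chore; infer_instance
def pvWitness_max_chore : Int × List Int × Int := (5, [2, 1, 3], 2)

def Spec_max_chore (target : Int) (data : List Int) (i : Int) (out : Int) : Prop := out = max_chore_alt target data i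
instance (target : Int) (data : List Int) (i : Int) (out : Int) : Decidable (Spec_max_chore target data i out) := by unfold Spec_max_chore; infer_instance

-- ===== CLAIM (what is proved, stated in full; the proofs are below) =====
def Claim_equal_max_chore : Prop := ∀ (target : Int) (data : List Int) (i : Int), Dom_max_chore target data i → Pre_max_chore target data i → Spec_max_chore target data i (max_chore target data i)

-- ===== LEMMAS AND PROOFS =====

-- Invariant: every memo entry stores the reference (port-A) value of its subproblem.
def MemoOK (data : List Int) (memo : PySem.Dict (Int × Int) Int) : Prop :=
  ∀ t j v, memo.get? (t, j) = some v → v = max_chore t data j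

lemma goAlt_correct (data : List Int) : ∀ (n : Nat) (t j : Int) (memo : PySem.Dict (Int × Int) Int),
    (j + 1).toNat ≤ n → MemoOK data memo →
    (goAlt data memo t j).1 = max_chore t data j ∧ MemoOK data (goAlt data memo t j).2 := by
  intro n
  induction n with
  | zero =>
    intro t j memo hn hok
    have hj : j < 0 := by omega
    rw [goAlt, max_chore]
    simp [hj]
    exact hok
  | succ n ih =>
    intro t j memo hn hok
    by_cases hbase : t ≤ 0 ∨ j < 0
    · have hA : max_chore t data j = 0 := by
        rw [max_chore]
        split_ifs <;> first | rfl | omega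
      rw [goAlt]
      simp [hbase, hA]
      exact hok
    · push Not at hbase
      obtain ⟨ht, hj⟩ := hbase
      have hjn : (j - 1 + 1).toNat ≤ n := by omega
      rw [goAlt]
      simp only [show ¬(t ≤ 0 ∨ j < 0) from by omega, if_false]
      cases hmem : memo.get? (t, j) with
      | some v =>
        simp only []
        exact ⟨hok t j v hmem, hok⟩
      | none =>
        simp only []
        set x := (PySem.List.pyGet? data j).getD 0 with hx
        have hA : max_chore t data j =
            if x > t then max_chore t data (j - 1)
            else max (1 + max_chore (t - x) data (j - 1)) (max_chore t data (j - 1)) := by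
          rw [max_chore]
          simp [show ¬ t = 0 from by omega, show ¬ t < 0 from by omega, show ¬ j < 0 from by omega, hx]
        by_cases hgt : x > t
        · obtain ⟨h1, h2⟩ := ih t (j - 1) memo hjn hok
          simp only [hgt, if_true]
          constructor
          · simp [h1, hA, hgt]
          · intro t' j' v hv
            rw [PySem.Dict.get?_insert] at hv
            split_ifs at hv with he
            · cases hv
              have : (t', j') = (t, j) := he
              cases this
              simp [h1, hA, hgt]
            · exact h2 t' j' v hv
        · obtain ⟨h1, h2⟩ := ih (t - x) (j - 1) memo hjn hok
          obtain ⟨h3, h4⟩ := ih t (j - 1) (goAlt data memo (t - x) (j - 1)).2 hjn h2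
          simp only [hgt, if_false]
          constructor
          · simp [h1, h3, hA, hgt]
          · intro t' j' v hv
            rw [PySem.Dict.get?_insert] at hv
            split_ifs at hv with he
            · cases hv
              have : (t', j') = (t, j) := he
              cases this
              simp [h1, h3, hA, hgt]
            · exact h4 t' j' v hv

-- ===== VERDICT (by name: the statement is the Claim_ definition above) =====
theorem max_chore_spec : Claim_equal_max_chore := by
  intro target data i _ _
  unfold Spec_max_chore max_chore_alt
  have h := goAlt_correct data (i + 1).toNat target i PySem.Dict.empty le_rfl
    (by intro t j v hv; simp [PySem.Dict.get?, PySem.Dict.empty] at hv)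
  exact (h.1).symm
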